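-- pv_equiv track=rewrite | github.com/Telmooo/FEUP | 1st_Year/Programming-Fundamentals/FPRO-Play/6/Minion game.py | minion
-- ===== SOURCE A (Python) =====
-- def minion(astring):
--     v = "AEIOU"
--     st = {}
--     ke = {}
--     for c, i in zip(astring, range(len(astring))):
--         if c in v:
--             if c not in ke:
--                 ke[c] = 1
--             else: ke[c] += 1
--             s = c
--             for ac in astring[i+1:]:
--                 s += ac
--                 if s not in ke:
--                     ke[s] = 1
--                 else: ke[s] += 1
--         if c not in v:
--             if c not in st:
--                 st[c] = 1
--             else: st[c] += 1
--             s = c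
--             for ac in astring[i+1:]:
--                 s += ac
--                 if s not in st:
--                     st[s] = 1
--                 else: st[s] += 1
--     pst = sum(st.values())
--     pke = sum(ke.values())
--     if pst == pke:
--         res = "It was a draw!"
--     elif pst > pke:
--         ls = sorted(list(st.items()), key = lambda x: (len(x[0]), astring.find(x[0])))
--         l = f"The winner was Stuart with a total of {pst} points:"
--         d = "\n".join(f"- {obj[0]}: {obj[1]}" for obj in ls)
--         res = "\n".join((l, d))
--     else:
--         ls = sorted(list(ke.items()), key = lambda x: (len(x[0]), astring.find(x[0])))
--         l = f"The winner was Kevin with a total of {pke} points:"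
--         d = "\n".join(f"- {obj[0]}: {obj[1]}" for obj in ls)
--         res = "\n".join((l, d))
--     return res
-- ===== SOURCE B (Python) =====
-- def minion(astring):
--     n = len(astring)
--     stuart = 0
--     kevin = 0
--     for i, c in enumerate(astring):
--         if c in "AEIOU":
--             kevin += n - i
--         else:
--             stuart += n - i
--     if stuart == kevin:
--         return "It was a draw!"
--     want_vowel = stuart < kevin
--     winner = "Kevin" if want_vowel else "Stuart"
--     total = kevin if want_vowel else stuart
--     d = {}
--     for i, c in enumerate(astring):
--         if (c in "AEIOU") == want_vowel:
--             for j in range(i + 1, n + 1):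
--                 s = astring[i:j]
--                 d[s] = d.get(s, 0) + 1
--     lines = ["The winner was " + winner + " with a total of " + str(total) + " points:"]
--     for s, cnt in sorted(d.items(), key=lambda x: (len(x[0]), astring.find(x[0]))):
--         lines.append("- " + s + ": " + str(cnt))
--     return "\n".join(lines)
-- ===== Notes on version B (the rewrite author's own statement) =====
-- stated objective: alternative
-- what changed: B computes both players' scores arithmetically in a single pass (each position i contributes len-i to its player) instead of summing dict values, and builds the substring-count dict only for the winning side using slices and dict.get, instead of A's building both full substring dicts via incremental string extension.
import Mathlib
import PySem

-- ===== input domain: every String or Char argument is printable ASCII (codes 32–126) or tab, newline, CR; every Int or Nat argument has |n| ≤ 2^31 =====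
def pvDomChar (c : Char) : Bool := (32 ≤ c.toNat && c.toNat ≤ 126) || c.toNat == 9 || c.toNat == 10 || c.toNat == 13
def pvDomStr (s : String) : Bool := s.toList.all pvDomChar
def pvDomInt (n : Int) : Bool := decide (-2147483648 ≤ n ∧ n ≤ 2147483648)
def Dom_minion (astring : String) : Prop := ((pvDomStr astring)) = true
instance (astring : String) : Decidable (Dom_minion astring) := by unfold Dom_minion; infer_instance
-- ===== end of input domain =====

-- B computes both scores arithmetically in one pass (adding len-i per position) and builds the
-- substring-count dict only for the winning side, from slices; objective: alternative
-- decomposition (the loser's dict is never built).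

-- ===== PORT A =====
-- `if s not in d: d[s] = 1 else: d[s] += 1`
def pvBumpA (d : PySem.Dict (List Char) Int) (s : List Char) : PySem.Dict (List Char) Int :=
  if d.contains s = false then d.insert s 1 else d.modify s 0 (· + 1)

-- the body A runs at one position: bump the single char, then extend s over astring[i+1:]
def pvInnerA (d : PySem.Dict (List Char) Int) (c : Char) (rest : List Char) :
    PySem.Dict (List Char) Int :=
  (rest.foldl
    (fun (p : List Char × PySem.Dict (List Char) Int) ac =>
      (p.1 ++ [ac], pvBumpA p.2 (p.1 ++ [ac])))
    ([c], pvBumpA d [c])).2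

-- one iteration of A's main loop over (c, i); state is (st, ke)
def pvStepA (cs : List Char)
    (p : PySem.Dict (List Char) Int × PySem.Dict (List Char) Int) (ci : Char × Int) :
    PySem.Dict (List Char) Int × PySem.Dict (List Char) Int :=
  ((if ("AEIOU".toList.contains ci.1) = false then
      pvInnerA p.1 ci.1 (PySem.List.slice cs (some (ci.2 + 1)) none) else p.1),
   (if "AEIOU".toList.contains ci.1 then
      pvInnerA p.2 ci.1 (PySem.List.slice cs (some (ci.2 + 1)) none) else p.2))

def pvMinionA (cs : List Char) : List Char :=
  let p := (cs.zip (PySem.List.pyRange 0 (cs.length : Int) 1)).foldl (pvStepA cs)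
             (PySem.Dict.empty, PySem.Dict.empty)
  let pst := p.1.values.sum
  let pke := p.2.values.sum
  if pst = pke then "It was a draw!".toList
  else if pst > pke then
    let ls := PySem.List.sorted2 p.1.items (fun x => (x.1.length : Int))
                (fun x => PySem.Chars.find cs x.1)
    let l := "The winner was Stuart with a total of ".toList ++ PySem.Int.toChars pst ++
             " points:".toList
    let d := PySem.Chars.join "\n".toList
               (ls.map (fun ob => "- ".toList ++ ob.1 ++ ": ".toList ++ PySem.Int.toChars ob.2))
    PySem.Chars.join "\n".toList [l, d]
  else
    let ls := PySem.List.sorted2 p.2.items (fun x => (x.1.length : Int))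
                (fun x => PySem.Chars.find cs x.1)
    let l := "The winner was Kevin with a total of ".toList ++ PySem.Int.toChars pke ++
             " points:".toList
    let d := PySem.Chars.join "\n".toList
               (ls.map (fun ob => "- ".toList ++ ob.1 ++ ": ".toList ++ PySem.Int.toChars ob.2))
    PySem.Chars.join "\n".toList [l, d]

def minion (astring : String) : String := String.ofList (pvMinionA astring.toList)

-- ===== PORT B =====
-- `d[s] = d.get(s, 0) + 1`
def pvBumpB (d : PySem.Dict (List Char) Int) (s : List Char) : PySem.Dict (List Char) Int :=
  d.insert s (d.getD s 0 + 1)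

-- B's inner loop at winning position i: count every slice astring[i:j], j = i+1 .. n
def pvInnerB (cs : List Char) (d : PySem.Dict (List Char) Int) (i : Int) :
    PySem.Dict (List Char) Int :=
  (PySem.List.pyRange (i + 1) ((cs.length : Int) + 1) 1).foldl
    (fun d j => pvBumpB d (PySem.List.slice cs (some i) (some j))) d

def pvMinionB (cs : List Char) : List Char :=
  let n : Int := cs.length
  let sc := (PySem.List.enumerate cs 0).foldl
      (fun (p : Int × Int) ic =>
        if "AEIOU".toList.contains ic.2 then (p.1, p.2 + (n - ic.1))
        else (p.1 + (n - ic.1), p.2))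
      (0, 0)
  let stuart := sc.1
  let kevin := sc.2
  if stuart = kevin then "It was a draw!".toList
  else
    let wantVowel : Bool := decide (stuart < kevin)
    let winner := if wantVowel then "Kevin".toList else "Stuart".toList
    let total := if wantVowel then kevin else stuart
    let d := (PySem.List.enumerate cs 0).foldl
        (fun d ic =>
          if ("AEIOU".toList.contains ic.2) == wantVowel then pvInnerB cs d ic.1 else d)
        PySem.Dict.empty
    let ls := PySem.List.sorted2 d.items (fun x => (x.1.length : Int))
                (fun x => PySem.Chars.find cs x.1)
    let lines := ("The winner was ".toList ++ winner ++ " with a total of ".toList ++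
                  PySem.Int.toChars total ++ " points:".toList)
        :: ls.map (fun ob => "- ".toList ++ ob.1 ++ ": ".toList ++ PySem.Int.toChars ob.2)
    PySem.Chars.join "\n".toList lines

def minion_alt (astring : String) : String := String.ofList (pvMinionB astring.toList)

-- ===== PRECONDITION & SPEC =====
def Spec_minion (astring : String) (out : String) : Prop := out = minion_alt astring
instance (astring : String) (out : String) : Decidable (Spec_minion astring out) := by
  unfold Spec_minion; infer_instance

-- ===== CLAIM (what is proved, stated in full; the proofs are below) =====
def Claim_equal_minion : Prop := ∀ (astring : String), Dom_minion astring → Spec_minion astring (minion astring)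

-- ===== LEMMAS AND PROOFS =====

-- the nonempty prefixes of t, shortest first
def pvPfx (t : List Char) : List (List Char) := (List.range t.length).map (fun m => t.take (m + 1))

theorem pvBumpA_eq (d : PySem.Dict (List Char) Int) (s : List Char) :
    pvBumpA d s = pvBumpB d s := by
  unfold pvBumpA pvBumpB PySem.Dict.modify
  by_cases h : d.contains s = true
  · simp [h]
  · simp [h, PySem.Dict.getD_of_not_contains d 0 (eq_false_of_ne_true h)]

theorem pvFoldA_eq (rest : List Char) : ∀ (s : List Char) (d : PySem.Dict (List Char) Int),
    (rest.foldl
      (fun (p : List Char × PySem.Dict (List Char) Int) ac =>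
        (p.1 ++ [ac], pvBumpA p.2 (p.1 ++ [ac]))) (s, d)).2
    = ((List.range rest.length).map (fun m => s ++ rest.take (m + 1))).foldl pvBumpB d := by
  induction rest with
  | nil => intro s d; simp
  | cons ac rest ih =>
    intro s d
    rw [List.foldl_cons, ih (s ++ [ac]) (pvBumpA d (s ++ [ac])), pvBumpA_eq,
        List.length_cons, List.range_succ_eq_map]
    simp only [List.map_cons, List.map_map, List.foldl_cons, List.take_succ_cons, List.take_zero,
      Function.comp_def, Nat.succ_eq_add_one]
    congr 1
    apply List.map_congr_left
    intro m _
    simp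

theorem pvInnerA_eq (c : Char) (rest : List Char) (d : PySem.Dict (List Char) Int) :
    pvInnerA d c rest = (pvPfx (c :: rest)).foldl pvBumpB d := by
  unfold pvInnerA pvPfx
  rw [pvFoldA_eq rest [c] (pvBumpA d [c]), pvBumpA_eq,
      List.length_cons, List.range_succ_eq_map]
  simp only [List.map_cons, List.map_map, List.foldl_cons, List.take_succ_cons, List.take_zero,
    Function.comp_def, Nat.succ_eq_add_one]
  congr 1

theorem pvPyRange_one_eq (a b : Int) :
    PySem.List.pyRange a b 1 = (List.range (b - a).toNat).map (fun k : Nat => a + (k : Int)) := by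
  unfold PySem.List.pyRange
  rw [if_neg (by norm_num)]
  simp only [zero_lt_one, if_true]
  by_cases h : a < b
  · rw [if_pos h]
    have h1 : (b - a + 1 - 1) / 1 = b - a := by
      rw [Int.ediv_one]; ring
    rw [h1]
    simp
  · rw [if_neg h]
    have h0 : (b - a).toNat = 0 := by omega
    simp [h0]

theorem pvInnerB_eq (cs : List Char) (kn : Nat) (h : kn < cs.length)
    (d : PySem.Dict (List Char) Int) :
    pvInnerB cs d (kn : Int) = (pvPfx (cs.drop kn)).foldl pvBumpB d := by
  unfold pvInnerB pvPfx
  have hn : (((cs.length : Int) + 1) - ((kn : Int) + 1)).toNat = cs.length - kn := by omega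
  have hr : PySem.List.pyRange ((kn : Int) + 1) ((cs.length : Int) + 1) 1
      = (List.range (cs.length - kn)).map (fun m => (((kn + 1 + m : Nat)) : Int)) := by
    rw [pvPyRange_one_eq, hn]
    apply List.map_congr_left
    intro m _
    push_cast
    ring
  rw [hr, List.foldl_map (f := fun m : Nat => (((kn + 1 + m : Nat)) : Int)),
      List.length_drop, List.foldl_map (f := fun m : Nat => (cs.drop kn).take (m + 1))]
  apply PySem.List.foldl_congr_mem
  intro acc m _
  rw [PySem.List.slice_natCast]
  congr 2
  omega

theorem pvZipEnum (l : List Char) : ∀ (s : Int),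
    l.zip (PySem.List.pyRange s (s + (l.length : Int)) 1)
      = (PySem.List.enumerate l s).map (fun p => (p.2, p.1)) := by
  induction l with
  | nil => intro s; simp [PySem.List.enumerate_nil]
  | cons x l ih =>
    intro s
    rw [List.length_cons, PySem.List.enumerate_cons, List.map_cons]
    have hlt : s < s + ((l.length + 1 : Nat) : Int) := by push_cast; omega
    rw [PySem.List.pyRange_one_cons hlt, List.zip_cons_cons]
    congr 1
    have h2 : s + ((l.length + 1 : Nat) : Int) = (s + 1) + (l.length : Int) := by push_cast; ring
    rw [h2]
    exact ih (s + 1)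

theorem pvSplitA (cs : List Char) (l : List (Int × Char)) :
    ∀ (st ke : PySem.Dict (List Char) Int),
    l.foldl (fun p ic => pvStepA cs p (ic.2, ic.1)) (st, ke)
    = ((l.filter (fun ic => ! "AEIOU".toList.contains ic.2)).foldl
         (fun d ic => pvInnerA d ic.2 (PySem.List.slice cs (some (ic.1 + 1)) none)) st,
       (l.filter (fun ic => "AEIOU".toList.contains ic.2)).foldl
         (fun d ic => pvInnerA d ic.2 (PySem.List.slice cs (some (ic.1 + 1)) none)) ke) := by
  induction l with
  | nil => intro st ke; simp
  | cons ic l ih =>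
    intro st ke
    rw [List.foldl_cons]
    by_cases h : "AEIOU".toList.contains ic.2
    · have hstep : pvStepA cs (st, ke) (ic.2, ic.1)
          = (st, pvInnerA ke ic.2 (PySem.List.slice cs (some (ic.1 + 1)) none)) := by
        unfold pvStepA
        rw [if_pos h, if_neg (by rw [h]; exact fun hc => by cases hc)]
      rw [hstep, ih,
          List.filter_cons_of_neg (by rw [h]; decide),
          List.filter_cons_of_pos (by show ("AEIOU".toList.contains ic.2) = true; exact h),
          List.foldl_cons]
    · have h' : "AEIOU".toList.contains ic.2 = false := eq_false_of_ne_true h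
      have hstep : pvStepA cs (st, ke) (ic.2, ic.1)
          = (pvInnerA st ic.2 (PySem.List.slice cs (some (ic.1 + 1)) none), ke) := by
        unfold pvStepA
        rw [if_pos h', if_neg (by rw [h']; exact fun hc => by cases hc)]
      rw [hstep, ih,
          List.filter_cons_of_pos (by show (! "AEIOU".toList.contains ic.2) = true; rw [h']; rfl),
          List.filter_cons_of_neg (by rw [h']; decide),
          List.foldl_cons]

theorem pvStepEq (cs : List Char) (ic : Int × Char) (hm : ic ∈ PySem.List.enumerate cs 0)
    (d : PySem.Dict (List Char) Int) :
    pvInnerA d ic.2 (PySem.List.slice cs (some (ic.1 + 1)) none) = pvInnerB cs d ic.1 := by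
  rcases (PySem.List.mem_enumerate_iff cs 0 ic).1 hm with ⟨k, hk, hp⟩
  subst hp
  simp only [zero_add]
  have h1 : ((k : Int) + 1) = (((k + 1 : Nat)) : Int) := by push_cast; ring
  rw [h1, PySem.List.slice_from cs (by positivity), Int.toNat_natCast, pvInnerA_eq,
      ← List.drop_eq_getElem_cons hk]
  exact (pvInnerB_eq cs k hk d).symm

-- replacing the unique pair (s, v) by (s, v + 1) adds one to the sum of the second components
theorem pvSumUpd (s : List Char) (v : Int) : ∀ (l : List (List Char × Int)),
    (l.map Prod.fst).Nodup → (s, v) ∈ l →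
    ((l.map (fun p => if p.1 == s then (s, v + 1) else p)).map Prod.snd).sum
      = (l.map Prod.snd).sum + 1 := by
  intro l
  induction l with
  | nil => simp
  | cons p l ih =>
    intro hnd hm
    rw [List.map_cons] at hnd
    rcases List.mem_cons.1 hm with rfl | hm'
    · simp only [List.map_cons, beq_self_eq_true, if_true, List.sum_cons]
      have hs : ∀ q ∈ l, (fun p => if p.1 == s then (s, v + 1) else p) q = q := by
        intro q hq
        have hne : q.1 ≠ s := by
          intro he
          exact (List.nodup_cons.1 hnd).1 (List.mem_map.2 ⟨q, hq, he⟩)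
        simp [hne]
      rw [List.map_congr_left hs]
      simp
      ring
    · have hne : p.1 ≠ s := by
        intro he
        refine (List.nodup_cons.1 hnd).1 ?_
        rw [he]
        exact List.mem_map.2 ⟨(s, v), hm', rfl⟩
      have hp : (p.1 == s) = false := by simpa using hne
      simp only [List.map_cons, hp, Bool.false_eq_true, if_false, List.sum_cons]
      rw [ih (List.nodup_cons.1 hnd).2 hm']
      ring

-- one bump adds one to the sum of values (keys stay distinct)
theorem pvSumBump (d : PySem.Dict (List Char) Int) (s : List Char) (h : d.keys.Nodup) :
    (pvBumpB d s).values.sum = d.values.sum + 1 ∧ (pvBumpB d s).keys.Nodup := by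
  refine ⟨?_, PySem.Dict.nodup_keys_insert d s (d.getD s 0 + 1) h⟩
  by_cases hc : d.contains s = true
  · have hsome : (d.get? s).isSome := by rw [← PySem.Dict.contains_eq_isSome_get?]; exact hc
    rcases Option.isSome_iff_exists.1 hsome with ⟨v, hv⟩
    have hgd : d.getD s 0 = v := PySem.Dict.getD_of_get?_eq_some d 0 hv
    have hmem : (s, v) ∈ d.items := PySem.Dict.mem_items_of_get?_eq_some d hv
    unfold pvBumpB PySem.Dict.insert
    rw [if_pos hc]
    show ((d.items.map (fun p => if p.1 == s then (s, d.getD s 0 + 1) else p)).map Prod.snd).sum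
          = (d.items.map Prod.snd).sum + 1
    rw [hgd]
    exact pvSumUpd s v d.items h hmem
  · have hc' : d.contains s = false := eq_false_of_ne_true hc
    unfold pvBumpB PySem.Dict.insert
    rw [if_neg (by rw [hc']; exact fun hx => by cases hx),
        PySem.Dict.getD_of_not_contains d 0 hc']
    show ((d.items ++ [(s, 0 + 1)]).map Prod.snd).sum = (d.items.map Prod.snd).sum + 1
    rw [List.map_append]
    simp

theorem pvSumBumpFold (L : List (List Char)) : ∀ (d : PySem.Dict (List Char) Int),
    d.keys.Nodup →
    ((L.foldl pvBumpB d).values.sum = d.values.sum + (L.length : Int)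
      ∧ (L.foldl pvBumpB d).keys.Nodup) := by
  induction L with
  | nil => intro d h; simp [h]
  | cons x L ih =>
    intro d h
    obtain ⟨h1, h2⟩ := pvSumBump d x h
    obtain ⟨h3, h4⟩ := ih (pvBumpB d x) h2
    refine ⟨?_, by rw [List.foldl_cons]; exact h4⟩
    rw [List.foldl_cons, h3, h1, List.length_cons]
    push_cast
    ring

def pvScore (cs : List Char) (l : List (Int × Char)) : Int :=
  (l.map (fun ic => (cs.length : Int) - ic.1)).sum

theorem pvSumInnerFold (cs : List Char) (l : List (Int × Char))
    (hl : ∀ ic ∈ l, ∃ k : Nat, k < cs.length ∧ ic.1 = (k : Int)) :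
    ∀ (d : PySem.Dict (List Char) Int), d.keys.Nodup →
    ((l.foldl (fun d ic => pvInnerB cs d ic.1) d).values.sum = d.values.sum + pvScore cs l
      ∧ (l.foldl (fun d ic => pvInnerB cs d ic.1) d).keys.Nodup) := by
  induction l with
  | nil => intro d h; simp [h, pvScore]
  | cons ic l ih =>
    intro d hnd
    obtain ⟨k, hk, hk1⟩ := hl ic List.mem_cons_self
    have hi : pvInnerB cs d ic.1 = (pvPfx (cs.drop k)).foldl pvBumpB d := by
      rw [hk1]; exact pvInnerB_eq cs k hk d
    obtain ⟨h1, h2⟩ := pvSumBumpFold (pvPfx (cs.drop k)) d hnd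
    obtain ⟨h3, h4⟩ := ih (fun x hx => hl x (List.mem_cons_of_mem _ hx))
        (pvInnerB cs d ic.1) (by rw [hi]; exact h2)
    rw [List.foldl_cons]
    refine ⟨?_, h4⟩
    rw [h3, hi, h1]
    unfold pvScore
    rw [List.map_cons, List.sum_cons]
    have hlen : ((pvPfx (cs.drop k)).length : Int) = (cs.length : Int) - ic.1 := by
      unfold pvPfx
      rw [List.length_map, List.length_range, List.length_drop, hk1]
      push_cast [Nat.cast_sub hk.le]
      ring
    rw [hlen]
    ring

theorem pvSplitB (cs : List Char) (l : List (Int × Char)) : ∀ (a b : Int),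
    l.foldl (fun (p : Int × Int) ic =>
        if "AEIOU".toList.contains ic.2 then (p.1, p.2 + ((cs.length : Int) - ic.1))
        else (p.1 + ((cs.length : Int) - ic.1), p.2)) (a, b)
    = (a + pvScore cs (l.filter (fun ic => ! "AEIOU".toList.contains ic.2)),
       b + pvScore cs (l.filter (fun ic => "AEIOU".toList.contains ic.2))) := by
  induction l with
  | nil => intro a b; simp [pvScore]
  | cons ic l ih =>
    intro a b
    rw [List.foldl_cons]
    by_cases h : "AEIOU".toList.contains ic.2
    · rw [if_pos h, ih,
          List.filter_cons_of_neg (by rw [h]; decide),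
          List.filter_cons_of_pos (p := fun ic : Int × Char => "AEIOU".toList.contains ic.2) h]
      unfold pvScore
      rw [List.map_cons, List.sum_cons]
      simp only [Prod.mk.injEq]
      constructor
      · trivial
      · ring
    · have h' : "AEIOU".toList.contains ic.2 = false := eq_false_of_ne_true h
      rw [if_neg (by rw [h']; exact fun hx => by cases hx), ih,
          List.filter_cons_of_pos (p := fun ic : Int × Char => ! "AEIOU".toList.contains ic.2)
            (by show (! "AEIOU".toList.contains ic.2) = true; rw [h']; rfl),
          List.filter_cons_of_neg (p := fun ic : Int × Char => "AEIOU".toList.contains ic.2)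
            (by show ¬ "AEIOU".toList.contains ic.2 = true; rw [h']; decide)]
      unfold pvScore
      rw [List.map_cons, List.sum_cons]
      simp only [Prod.mk.injEq]
      constructor
      · ring
      · trivial

theorem pvJoinNest (sep a : List Char) (x : List (List Char)) (hx : x ≠ []) :
    PySem.Chars.join sep [a, PySem.Chars.join sep x] = PySem.Chars.join sep (a :: x) := by
  cases x with
  | nil => exact absurd rfl hx
  | cons b rest =>
    rw [PySem.Chars.join_cons_cons sep a (PySem.Chars.join sep (b :: rest)) [],
        PySem.Chars.join_singleton, PySem.Chars.join_cons_cons]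

theorem pvMain (cs : List Char) : pvMinionA cs = pvMinionB cs := by
  have hzip : cs.zip (PySem.List.pyRange 0 (cs.length : Int) 1)
      = (PySem.List.enumerate cs 0).map (fun p => (p.2, p.1)) := by
    have h := pvZipEnum cs 0
    rwa [zero_add] at h
  have hmemE : ∀ ic ∈ PySem.List.enumerate cs 0,
      ∃ k : Nat, k < cs.length ∧ ic.1 = (k : Int) := by
    intro ic h
    rcases (PySem.List.mem_enumerate_iff cs 0 ic).1 h with ⟨k, hk, hp⟩
    refine ⟨k, hk, ?_⟩
    rw [hp]
    simp
  have hev : (PySem.Dict.empty : PySem.Dict (List Char) Int).values = [] := rfl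
  simp only [pvMinionA, pvMinionB, hzip, List.foldl_map, pvSplitA, pvSplitB, zero_add]
  set lst := (PySem.List.enumerate cs 0).filter
      (fun ic => ! "AEIOU".toList.contains ic.2) with hlst
  set lke := (PySem.List.enumerate cs 0).filter
      (fun ic => "AEIOU".toList.contains ic.2) with hlke
  have hsub1 : ∀ ic ∈ lst, ic ∈ PySem.List.enumerate cs 0 :=
    fun ic h => List.mem_of_mem_filter h
  have hsub2 : ∀ ic ∈ lke, ic ∈ PySem.List.enumerate cs 0 :=
    fun ic h => List.mem_of_mem_filter h
  have hstD : lst.foldl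
        (fun d ic => pvInnerA d ic.2 (PySem.List.slice cs (some (ic.1 + 1)) none))
        PySem.Dict.empty
      = lst.foldl (fun d ic => pvInnerB cs d ic.1) PySem.Dict.empty :=
    PySem.List.foldl_congr_mem _ _ _ _ (fun acc x hx => pvStepEq cs x (hsub1 x hx) acc)
  have hkeD : lke.foldl
        (fun d ic => pvInnerA d ic.2 (PySem.List.slice cs (some (ic.1 + 1)) none))
        PySem.Dict.empty
      = lke.foldl (fun d ic => pvInnerB cs d ic.1) PySem.Dict.empty :=
    PySem.List.foldl_congr_mem _ _ _ _ (fun acc x hx => pvStepEq cs x (hsub2 x hx) acc)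
  rw [hstD, hkeD]
  have hstSum : (lst.foldl (fun d ic => pvInnerB cs d ic.1) PySem.Dict.empty).values.sum
      = pvScore cs lst := by
    have h := (pvSumInnerFold cs lst (fun ic h => hmemE ic (hsub1 ic h))
        PySem.Dict.empty PySem.Dict.nodup_keys_empty).1
    simpa [hev] using h
  have hkeSum : (lke.foldl (fun d ic => pvInnerB cs d ic.1) PySem.Dict.empty).values.sum
      = pvScore cs lke := by
    have h := (pvSumInnerFold cs lke (fun ic h => hmemE ic (hsub2 ic h))
        PySem.Dict.empty PySem.Dict.nodup_keys_empty).1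
    simpa [hev] using h
  rw [hstSum, hkeSum]
  have hnn : ∀ l : List (Int × Char), (∀ ic ∈ l, ic ∈ PySem.List.enumerate cs 0) →
      0 ≤ pvScore cs l := by
    intro l hsub
    apply List.sum_nonneg
    intro x hx
    rcases List.mem_map.1 hx with ⟨ic, hic, rfl⟩
    rcases hmemE ic (hsub ic hic) with ⟨k, hk, hk1⟩
    rw [hk1]
    omega
  have hitemsNe : ∀ l : List (Int × Char), (∀ ic ∈ l, ic ∈ PySem.List.enumerate cs 0) →
      0 < pvScore cs l →
      (l.foldl (fun d ic => pvInnerB cs d ic.1) PySem.Dict.empty).items ≠ [] := by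
    intro l hsub hpos h0
    have hsum := (pvSumInnerFold cs l (fun ic h => hmemE ic (hsub ic h))
        PySem.Dict.empty PySem.Dict.nodup_keys_empty).1
    have hv : (l.foldl (fun d ic => pvInnerB cs d ic.1) PySem.Dict.empty).values = [] := by
      show (l.foldl (fun d ic => pvInnerB cs d ic.1) PySem.Dict.empty).items.map
          (fun x => x.2) = []
      rw [h0]
      rfl
    rw [hv, hev] at hsum
    simp at hsum
    omega
  by_cases hd : pvScore cs lst = pvScore cs lke
  · rw [if_pos hd, if_pos hd]
  · rw [if_neg hd, if_neg hd]
    by_cases hgt : pvScore cs lst > pvScore cs lke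
    · rw [if_pos hgt]
      have hwv : decide (pvScore cs lst < pvScore cs lke) = false := by
        simp [not_lt.2 (le_of_lt hgt)]
      rw [hwv]
      simp only [Bool.false_eq_true, if_false]
      have hdict : (PySem.List.enumerate cs 0).foldl
            (fun d ic => if ("AEIOU".toList.contains ic.2) == false
              then pvInnerB cs d ic.1 else d) PySem.Dict.empty
          = lst.foldl (fun d ic => pvInnerB cs d ic.1) PySem.Dict.empty := by
        rw [PySem.List.foldl_if_eq_foldl_filter]
        congr 1
        rw [hlst]
        apply List.filter_congr
        intro x _
        simp
      rw [hdict]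
      have hpos : 0 < pvScore cs lst := lt_of_le_of_lt (hnn lke hsub2) hgt
      have hne := hitemsNe lst hsub1 hpos
      have hlsne : PySem.List.sorted2
          (lst.foldl (fun d ic => pvInnerB cs d ic.1) PySem.Dict.empty).items
          (fun x => (x.1.length : Int)) (fun x => PySem.Chars.find cs x.1) ≠ [] := by
        intro h0
        have hp := PySem.List.sorted2_perm
          (lst.foldl (fun d ic => pvInnerB cs d ic.1) PySem.Dict.empty).items
          (fun x => (x.1.length : Int)) (fun x => PySem.Chars.find cs x.1) false
        rw [h0] at hp
        exact hne hp.symm.eq_nil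
      have hmapne : (PySem.List.sorted2
          (lst.foldl (fun d ic => pvInnerB cs d ic.1) PySem.Dict.empty).items
          (fun x => (x.1.length : Int)) (fun x => PySem.Chars.find cs x.1)).map
          (fun ob => "- ".toList ++ ob.1 ++ ": ".toList ++ PySem.Int.toChars ob.2) ≠ [] := by
        rw [Ne, List.map_eq_nil_iff]
        exact hlsne
      rw [pvJoinNest _ _ _ hmapne]
      have hhdr : "The winner was Stuart with a total of ".toList
          = "The winner was ".toList ++ "Stuart".toList ++ " with a total of ".toList := by
        decide
      rw [hhdr]
    · have hlt : pvScore cs lst < pvScore cs lke :=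
        lt_of_le_of_ne (not_lt.1 hgt) hd
      rw [if_neg hgt]
      have hwv : decide (pvScore cs lst < pvScore cs lke) = true := by
        simpa using hlt
      rw [hwv]
      simp only [if_true]
      have hdict : (PySem.List.enumerate cs 0).foldl
            (fun d ic => if ("AEIOU".toList.contains ic.2) == true
              then pvInnerB cs d ic.1 else d) PySem.Dict.empty
          = lke.foldl (fun d ic => pvInnerB cs d ic.1) PySem.Dict.empty := by
        rw [PySem.List.foldl_if_eq_foldl_filter]
        congr 1
        rw [hlke]
        apply List.filter_congr
        intro x _
        simp
      rw [hdict]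
      have hpos : 0 < pvScore cs lke := lt_of_le_of_lt (hnn lst hsub1) hlt
      have hne := hitemsNe lke hsub2 hpos
      have hlsne : PySem.List.sorted2
          (lke.foldl (fun d ic => pvInnerB cs d ic.1) PySem.Dict.empty).items
          (fun x => (x.1.length : Int)) (fun x => PySem.Chars.find cs x.1) ≠ [] := by
        intro h0
        have hp := PySem.List.sorted2_perm
          (lke.foldl (fun d ic => pvInnerB cs d ic.1) PySem.Dict.empty).items
          (fun x => (x.1.length : Int)) (fun x => PySem.Chars.find cs x.1) false
        rw [h0] at hp
        exact hne hp.symm.eq_nil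
      have hmapne : (PySem.List.sorted2
          (lke.foldl (fun d ic => pvInnerB cs d ic.1) PySem.Dict.empty).items
          (fun x => (x.1.length : Int)) (fun x => PySem.Chars.find cs x.1)).map
          (fun ob => "- ".toList ++ ob.1 ++ ": ".toList ++ PySem.Int.toChars ob.2) ≠ [] := by
        rw [Ne, List.map_eq_nil_iff]
        exact hlsne
      rw [pvJoinNest _ _ _ hmapne]
      have hhdr : "The winner was Kevin with a total of ".toList
          = "The winner was ".toList ++ "Kevin".toList ++ " with a total of ".toList := by
        decide
      rw [hhdr]

-- ===== VERDICT (by name: the statement is the Claim_ definition above) =====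
theorem minion_spec : Claim_equal_minion := by
  intro astring _
  unfold Spec_minion minion minion_alt
  rw [pvMain]
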